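-- pv_equiv track=rewrite | github.com/ingenious452/Messaging | encryption/encryption.py | encryption_key
-- ===== SOURCE A (Python) =====
-- from typing import List, Tuple
--
-- def factors_of(num: int) -> List[int]:
--     """
--     Take a number an return a list of all it's factors
--
--     :args num: integer whose factors to calculate.
--     :retun factors: List of factors of the given number.
--     """
--
--     factors = []
--     for n in range(2, num+1):
--         if num % n == 0:
--             factors.append(n)
--     return factors
--
-- def encryption_key(prime_product: int, phi: int) -> int:
--     """
--     Take the prime_product and phi value and calculate e
--     by checking the value which is coprime with both prime_product
--     and phi.
--
--     :args prime_product: The product of two secret prime number.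
--     :return i or None: The value.
--     """
--
--     modulo_factors = set(factors_of(prime_product))
--     phi_factor = set(factors_of(phi))
--
--     for i in range(2, phi):
--         if not (set(factors_of(i)).intersection(modulo_factors)
--         or set(factors_of(i)).intersection(phi_factor)):
--             return i
--     return None
-- ===== SOURCE B (Python) =====
-- def prime_factors(n):
--     """Ascending list of the distinct prime factors of n (empty for n < 2)."""
--     ps = []
--     d = 2
--     while d * d <= n:
--         if n % d == 0:
--             ps.append(d)
--             while n % d == 0:
--                 n //= d
--         d += 1
--     if n >= 2:
--         ps.append(n)
--     return ps
--
--
-- def encryption_key(prime_product: int, phi: int) -> int: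
--     if phi <= 2:
--         return None
--     blocked = [False] * phi
--     for p in prime_factors(prime_product) + prime_factors(phi):
--         for m in range(p, phi, p):
--             blocked[m] = True
--     for i in range(2, phi):
--         if not blocked[i]:
--             return i
--     return None
-- ===== Notes on version B (the rewrite author's own statement) =====
-- stated objective: faster
-- what changed: Instead of fully factoring every candidate i and intersecting divisor sets, B trial-divides prime_product and phi once into their distinct prime factors, marks multiples of those primes in a boolean sieve over [0, phi), and returns the first unmarked index >= 2.
import Mathlib
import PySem

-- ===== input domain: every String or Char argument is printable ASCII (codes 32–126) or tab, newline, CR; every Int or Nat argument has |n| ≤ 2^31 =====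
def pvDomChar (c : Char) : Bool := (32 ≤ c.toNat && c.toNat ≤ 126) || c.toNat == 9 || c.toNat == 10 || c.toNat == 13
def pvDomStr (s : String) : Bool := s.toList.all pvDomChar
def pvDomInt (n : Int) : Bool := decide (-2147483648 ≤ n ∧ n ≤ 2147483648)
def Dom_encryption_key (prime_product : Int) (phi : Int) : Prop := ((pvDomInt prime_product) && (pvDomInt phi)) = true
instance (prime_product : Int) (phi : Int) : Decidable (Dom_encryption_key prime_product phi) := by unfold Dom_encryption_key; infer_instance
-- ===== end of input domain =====

-- B replaces A's per-candidate divisor-set intersections by factoring prime_product and phi once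
-- (trial division) and sieving multiples of those primes in a boolean array (objective: faster).

-- ===== PORT A =====
-- factors_of(num): all divisors n in [2, num] of num
def factors_of (num : Int) : List Int :=
  (PySem.List.pyRange 2 (num + 1) 1).foldl
    (fun factors n => if PySem.Int.mod num n = 0 then factors ++ [n] else factors) []

-- the 'for i in range(2, phi)' loop with its early return
def pvKeyLoop (mf pf : PySem.Set Int) : List Int → Option Int
  | [] => none
  | i :: rest =>
      if PySem.Set.inter (PySem.Set.ofList (factors_of i)) mf = []
          ∧ PySem.Set.inter (PySem.Set.ofList (factors_of i)) pf = [] then some i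
      else pvKeyLoop mf pf rest

def encryption_key (prime_product : Int) (phi : Int) : Option Int :=
  pvKeyLoop (PySem.Set.ofList (factors_of prime_product)) (PySem.Set.ofList (factors_of phi))
    (PySem.List.pyRange 2 phi 1)

-- ===== PORT B =====
-- used by the termination proofs of pvStrip/pvFactorLoop
theorem pv_ediv_lt (n d : Int) (hn : 0 < n) (hd : 2 ≤ d) : n / d < n := by
  rw [Int.ediv_lt_iff_lt_mul (by omega)]
  nlinarith

-- 'while n % d == 0: n //= d' (the guard only makes the recursion total; in B it is always called
-- with 2 ≤ d and 0 < n, where the Python loop runs exactly these steps)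
def pvStrip (n d : Int) : Int :=
  if h : 2 ≤ d ∧ 0 < n ∧ PySem.Int.mod n d = 0 then pvStrip (PySem.Int.floordiv n d) d else n
termination_by n.toNat
decreasing_by
  have hd : PySem.Int.floordiv n d = n / d := PySem.Int.floordiv_eq_ediv_of_pos (by omega)
  have h1 : n / d < n := pv_ediv_lt n d h.2.1 h.1
  have h2 : 0 ≤ n / d := Int.ediv_nonneg (by omega) (by omega)
  omega

theorem pvStrip_le (n d : Int) : pvStrip n d ≤ n := by
  unfold pvStrip
  split
  · rename_i h
    have hd : PySem.Int.floordiv n d = n / d := PySem.Int.floordiv_eq_ediv_of_pos (by omega)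
    have h1 : n / d < n := pv_ediv_lt n d h.2.1 h.1
    have := pvStrip_le (PySem.Int.floordiv n d) d
    omega
  · exact le_refl n
termination_by n.toNat
decreasing_by
  rename_i h
  have hd : PySem.Int.floordiv n d = n / d := PySem.Int.floordiv_eq_ediv_of_pos (by omega)
  have h1 : n / d < n := pv_ediv_lt n d h.2.1 h.1
  have h2 : 0 ≤ n / d := Int.ediv_nonneg (by omega) (by omega)
  omega

-- the 'while d * d <= n' loop of prime_factors (guard '2 ≤ d' only makes it total: B calls it with d = 2)
def pvFactorLoop (n d : Int) (ps : List Int) : List Int :=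
  if h : d * d ≤ n ∧ 2 ≤ d then
    if PySem.Int.mod n d = 0 then
      pvFactorLoop (pvStrip n d) (d + 1) (ps ++ [d])
    else
      pvFactorLoop n (d + 1) ps
  else
    if 2 ≤ n then ps ++ [n] else ps
termination_by (n + 1 - d).toNat
decreasing_by
  · have h2 : 2 * d ≤ d * d := by nlinarith [h.2]
    have := pvStrip_le n d
    omega
  · have h2 : 2 * d ≤ d * d := by nlinarith [h.2]
    omega

def pvPrimeFactors (n : Int) : List Int := pvFactorLoop n 2 []

-- the final 'for i in range(2, phi)' scan with its early return
def pvScan (blocked : List Bool) : List Int → Option Int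
  | [] => none
  | i :: rest =>
      if PySem.List.pyGetD blocked i true = false then some i else pvScan blocked rest

def encryption_key_alt (prime_product : Int) (phi : Int) : Option Int :=
  if phi ≤ 2 then none
  else
    let blocked :=
      (pvPrimeFactors prime_product ++ pvPrimeFactors phi).foldl
        (fun b p => (PySem.List.pyRange p phi p).foldl
          (fun b m => PySem.List.pySetD b m true) b)
        (List.replicate phi.toNat false)
    pvScan blocked (PySem.List.pyRange 2 phi 1)

-- ===== PRECONDITION & SPEC =====
def Spec_encryption_key (prime_product : Int) (phi : Int) (out : Option Int) : Prop := out = encryption_key_alt prime_product phi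
instance (prime_product : Int) (phi : Int) (out : Option Int) : Decidable (Spec_encryption_key prime_product phi out) := by unfold Spec_encryption_key; infer_instance

-- ===== CLAIM (what is proved, stated in full; the proofs are below) =====
def Claim_equal_encryption_key : Prop := ∀ (prime_product : Int) (phi : Int), Dom_encryption_key prime_product phi → Spec_encryption_key prime_product phi (encryption_key prime_product phi)

-- ===== LEMMAS AND PROOFS =====

-- "p has no proper divisor in [2, p)" — the invariant form of primality the trial division maintains
def IsPr (p : Int) : Prop := 2 ≤ p ∧ ∀ e : Int, 2 ≤ e → e < p → ¬ e ∣ p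

theorem isPr_iff (p : Int) : IsPr p ↔ 2 ≤ p ∧ Nat.Prime p.natAbs := by
  constructor
  · rintro ⟨h2, hno⟩
    refine ⟨h2, (Nat.prime_def_lt).mpr ⟨by omega, fun m hm hdvd => ?_⟩⟩
    by_contra hm1
    have hm0 : m ≠ 0 := by rintro rfl; simp at hdvd; omega
    have hm2 : 2 ≤ m := by omega
    have : (m : Int) ∣ p := by
      have : (m : Int) ∣ (p.natAbs : Int) := Int.natCast_dvd_natCast.mpr hdvd
      rwa [Int.natAbs_of_nonneg (by omega)] at this
    exact hno m (by exact_mod_cast hm2) (by omega) this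
  · rintro ⟨h2, hpr⟩
    refine ⟨h2, fun e he helt hdvd => ?_⟩
    have : e.natAbs ∣ p.natAbs := Int.natAbs_dvd_natAbs.mpr hdvd
    have h1 := (Nat.prime_def_lt.mp hpr).2 e.natAbs (by omega) this
    omega

theorem exists_isPr_dvd (d : Int) (hd : 2 ≤ d) : ∃ p, IsPr p ∧ p ∣ d := by
  obtain ⟨q, hq, hqd⟩ := Nat.exists_prime_and_dvd (n := d.natAbs) (by omega)
  refine ⟨(q : Int), (isPr_iff _).mpr ⟨by exact_mod_cast hq.two_le, by simpa using hq⟩, ?_⟩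
  have : (q : Int) ∣ (d.natAbs : Int) := Int.natCast_dvd_natCast.mpr hqd
  rwa [Int.natAbs_of_nonneg (by omega)] at this

theorem pvStrip_spec (n d : Int) (hd : 2 ≤ d) (hn : 1 ≤ n) :
    ∃ k : Nat, n = d ^ k * pvStrip n d ∧ ¬ d ∣ pvStrip n d ∧ 1 ≤ pvStrip n d := by
  induction n using pvStrip.induct (d := d) with
  | case1 n h ih =>
    obtain ⟨hd2, hn0, hmod⟩ := h
    have hdvd : d ∣ n := (PySem.Int.mod_eq_zero_iff_dvd n d).mp hmod
    have hfd : PySem.Int.floordiv n d = n / d := PySem.Int.floordiv_eq_ediv_of_pos (by omega)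
    have hmul : d * (n / d) = n := Int.mul_ediv_cancel' hdvd
    have hpos : 1 ≤ n / d := by
      rcases Int.lt_or_le (n / d) 1 with h1 | h1
      · nlinarith
      · exact h1
    obtain ⟨k, hk, hnd, hp⟩ := ih (by rw [hfd]; exact hpos)
    rw [pvStrip, dif_pos ⟨hd2, hn0, hmod⟩]
    refine ⟨k + 1, ?_, hnd, hp⟩
    have hgoal : n = d * (d ^ k * pvStrip (PySem.Int.floordiv n d) d) := by
      rw [← hk, hfd]; exact hmul.symm
    rw [pow_succ]
    conv_lhs => rw [hgoal]
    ring
  | case2 n h =>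
    rw [pvStrip, dif_neg h]
    refine ⟨0, by ring, ?_, hn⟩
    intro hdvd
    exact h ⟨hd, by omega, (PySem.Int.mod_eq_zero_iff_dvd n d).mpr hdvd⟩

theorem pr_dvd_pow_mul (p d s : Int) (k : Nat) (hp : IsPr p) (hd : IsPr d) (hs : 1 ≤ s)
    (hdvd : p ∣ d ^ k * s) : p = d ∨ p ∣ s := by
  obtain ⟨hp2, hppr⟩ := (isPr_iff p).mp hp
  obtain ⟨hd2, hdpr⟩ := (isPr_iff d).mp hd
  have h : p.natAbs ∣ (d ^ k * s).natAbs := Int.natAbs_dvd_natAbs.mpr hdvd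
  rw [Int.natAbs_mul, Int.natAbs_pow] at h
  rcases (Nat.Prime.dvd_mul hppr).mp h with h | h
  · left
    have := hppr.dvd_of_dvd_pow h
    have heq : p.natAbs = d.natAbs := (Nat.prime_dvd_prime_iff_eq hppr hdpr).mp this
    omega
  · right
    exact Int.natAbs_dvd_natAbs.mp h

theorem pvFactorLoop_mem (n d : Int) (ps : List Int) (hd : 2 ≤ d) (hn : 1 ≤ n)
    (hno : ∀ e : Int, 2 ≤ e → e < d → ¬ e ∣ n) (p : Int) :
    p ∈ pvFactorLoop n d ps ↔ p ∈ ps ∨ (IsPr p ∧ p ∣ n) := by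
  revert hd hn hno
  induction n, d, ps using pvFactorLoop.induct with
  | case1 n d ps h hmod ih =>
    intro hd hn hno
    rw [pvFactorLoop, dif_pos h, if_pos hmod]
    have hdvd : d ∣ n := (PySem.Int.mod_eq_zero_iff_dvd n d).mp hmod
    obtain ⟨k, hk, hnds, hs⟩ := pvStrip_spec n d hd hn
    have hsn : pvStrip n d ∣ n := ⟨d ^ k, by linear_combination hk⟩
    have hdpr : IsPr d := ⟨h.2, fun e he helt hedd => hno e he helt (hedd.trans hdvd)⟩
    have hno' : ∀ e : Int, 2 ≤ e → e < d + 1 → ¬ e ∣ pvStrip n d := by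
      intro e he helt hes
      rcases eq_or_lt_of_le (by omega : e ≤ d) with rfl | hlt
      · exact hnds hes
      · exact hno e he hlt (hes.trans hsn)
    rw [ih (by omega) hs hno']
    simp only [List.mem_append, List.mem_singleton]
    constructor
    · rintro ((hps | rfl) | ⟨hp, hpstrip⟩)
      · exact Or.inl hps
      · exact Or.inr ⟨hdpr, hdvd⟩
      · exact Or.inr ⟨hp, hpstrip.trans hsn⟩
    · rintro (hps | ⟨hp, hpn⟩)
      · exact Or.inl (Or.inl hps)
      · rcases pr_dvd_pow_mul p d (pvStrip n d) k hp hdpr hs (hk ▸ hpn) with rfl | hps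
        · exact Or.inl (Or.inr rfl)
        · exact Or.inr ⟨hp, hps⟩
  | case2 n d ps h hmod ih =>
    intro hd hn hno
    rw [pvFactorLoop, dif_pos h, if_neg hmod]
    refine ih (by omega) hn ?_
    intro e he helt hes
    rcases eq_or_lt_of_le (by omega : e ≤ d) with rfl | hlt
    · exact hmod ((PySem.Int.mod_eq_zero_iff_dvd n e).mpr hes)
    · exact hno e he hlt hes
  | case3 n d ps h hn2 =>
    intro hd hn hno
    rw [pvFactorLoop, dif_neg h, if_pos hn2]
    have hgt : n < d * d := by
      by_contra hc
      exact h ⟨by omega, hd⟩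
    have no_mid : ∀ e : Int, 2 ≤ e → e < n → ¬ e ∣ n := by
      intro e he hen hedvd
      obtain ⟨f, hf⟩ := hedvd
      have hf1 : 1 ≤ f := by nlinarith
      have hf2 : 2 ≤ f := by
        rcases eq_or_lt_of_le hf1 with rfl | _
        · omega
        · omega
      by_cases hlt : e < d
      · exact hno e he hlt ⟨f, hf⟩
      · have hge : d ≤ e := by omega
        have hfd : f < d := by nlinarith
        exact hno f hf2 hfd ⟨e, by linear_combination hf⟩
    simp only [List.mem_append, List.mem_singleton]
    constructor
    · rintro (hps | rfl)
      · exact Or.inl hps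
      · exact Or.inr ⟨⟨hn2, no_mid⟩, dvd_refl _⟩
    · rintro (hps | ⟨hp, hpn⟩)
      · exact Or.inl hps
      · refine Or.inr ?_
        have hple : p ≤ n := Int.le_of_dvd (by omega) hpn
        rcases eq_or_lt_of_le hple with rfl | hlt
        · rfl
        · exact absurd hpn (no_mid p hp.1 hlt)
  | case4 n d ps h hn2 =>
    intro hd hn hno
    rw [pvFactorLoop, dif_neg h, if_neg hn2]
    constructor
    · exact Or.inl
    · rintro (hps | ⟨hp, hpn⟩)
      · exact hps
      · have := Int.le_of_dvd (by omega) hpn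
        have := hp.1
        omega

theorem pvPrimeFactors_mem (n p : Int) :
    p ∈ pvPrimeFactors n ↔ IsPr p ∧ p ∣ n ∧ 2 ≤ n := by
  by_cases hn : 1 ≤ n
  · rw [pvPrimeFactors,
      pvFactorLoop_mem n 2 [] (le_refl 2) hn (by intro e he helt; omega) p]
    simp only [List.not_mem_nil, false_or]
    constructor
    · rintro ⟨hp, hpn⟩
      refine ⟨hp, hpn, ?_⟩
      rcases eq_or_lt_of_le hn with rfl | _
      · have := Int.le_of_dvd (by omega) hpn
        have := hp.1
        omega
      · omega
    · rintro ⟨hp, hpn, _⟩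
      exact ⟨hp, hpn⟩
  · rw [pvPrimeFactors, pvFactorLoop]
    rw [dif_neg (by intro hc; omega), if_neg (by omega)]
    simp only [List.not_mem_nil, false_iff]
    rintro ⟨_, _, _⟩
    omega

theorem mem_factors_of (num x : Int) : x ∈ factors_of num ↔ 2 ≤ x ∧ x ≤ num ∧ x ∣ num := by
  unfold factors_of
  rw [PySem.List.foldl_append_ite_eq_filter (fun n => PySem.Int.mod num n = 0)]
  simp only [List.nil_append, List.mem_filter, decide_eq_true_eq, PySem.List.mem_pyRange_one]
  constructor
  · rintro ⟨⟨h1, h2⟩, h3⟩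
    exact ⟨h1, by omega, (PySem.Int.mod_eq_zero_iff_dvd num x).mp h3⟩
  · rintro ⟨h1, h2, h3⟩
    exact ⟨⟨h1, by omega⟩, (PySem.Int.mod_eq_zero_iff_dvd num x).mpr h3⟩

theorem inter_factors_empty_iff (i n : Int) (hi : 2 ≤ i) :
    PySem.Set.inter (PySem.Set.ofList (factors_of i)) (PySem.Set.ofList (factors_of n)) = []
      ↔ ¬ ∃ p, IsPr p ∧ p ∣ i ∧ p ∣ n ∧ 2 ≤ n := by
  rw [List.eq_nil_iff_forall_not_mem]
  constructor
  · rintro h ⟨p, hp, hpi, hpn, hn2⟩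
    apply h p
    rw [PySem.Set.mem_inter, PySem.Set.mem_ofList, PySem.Set.mem_ofList,
      mem_factors_of, mem_factors_of]
    exact ⟨⟨hp.1, Int.le_of_dvd (by omega) hpi, hpi⟩,
      ⟨hp.1, Int.le_of_dvd (by omega) hpn, hpn⟩⟩
  · intro h x hx
    rw [PySem.Set.mem_inter, PySem.Set.mem_ofList, PySem.Set.mem_ofList,
      mem_factors_of, mem_factors_of] at hx
    obtain ⟨⟨hx2, hxi, hxdi⟩, _, hxn, hxdn⟩ := hx
    obtain ⟨p, hp, hpd⟩ := exists_isPr_dvd x hx2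
    exact h ⟨p, hp, hpd.trans hxdi, hpd.trans hxdn, by omega⟩

theorem mark_len (l : List Int) (b : List Bool) :
    (l.foldl (fun b m => PySem.List.pySetD b m true) b).length = b.length := by
  induction l generalizing b with
  | nil => rfl
  | cons m rest ih =>
    simp only [List.foldl_cons]
    rw [ih, PySem.List.length_pySetD]

theorem mark_get (l : List Int) (b : List Bool) (i : Int) (dflt : Bool)
    (hm : ∀ m ∈ l, 0 ≤ m) (hi0 : 0 ≤ i) (hil : i < (b.length : Int)) :
    PySem.List.pyGetD (l.foldl (fun b m => PySem.List.pySetD b m true) b) i dflt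
      = if i ∈ l then true else PySem.List.pyGetD b i dflt := by
  induction l generalizing b with
  | nil => simp
  | cons m rest ih =>
    have hm0 : 0 ≤ m := hm m (List.mem_cons_self)
    have hlen : (PySem.List.pySetD b m true).length = b.length :=
      PySem.List.length_pySetD b m true
    simp only [List.foldl_cons, List.mem_cons]
    rw [ih _ (fun x hx => hm x (List.mem_cons_of_mem _ hx)) (by rw [hlen]; exact hil)]
    by_cases hir : i ∈ rest
    · simp [hir]
    · simp only [hir, if_false, or_false]
      rw [PySem.List.pySetD_of_nonneg b true hm0,
        PySem.List.pyGetD_eq_getElem _ dflt hi0 (by rw [List.length_set]; exact hil),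
        PySem.List.pyGetD_eq_getElem b dflt hi0 hil,
        List.getElem_set]
      by_cases him : i = m
      · simp [him]
      · rw [if_neg (by omega), if_neg him]

theorem sieve_get (P : List Int) (phi : Int) (b : List Bool) (i : Int) (dflt : Bool)
    (hP : ∀ p ∈ P, 2 ≤ p) (hi0 : 0 ≤ i) (hil : i < (b.length : Int)) :
    PySem.List.pyGetD (P.foldl (fun b p => (PySem.List.pyRange p phi p).foldl
        (fun b m => PySem.List.pySetD b m true) b) b) i dflt
      = if ∃ p ∈ P, i ∈ PySem.List.pyRange p phi p then true else PySem.List.pyGetD b i dflt := by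
  induction P generalizing b with
  | nil => simp
  | cons p rest ih =>
    have hp2 : 2 ≤ p := hP p List.mem_cons_self
    have hmr : ∀ m ∈ PySem.List.pyRange p phi p, 0 ≤ m := by
      intro m hmm
      have := (PySem.List.mem_pyRange_iff_of_pos (by omega) m).mp hmm
      omega
    have hlen : ((PySem.List.pyRange p phi p).foldl
        (fun b m => PySem.List.pySetD b m true) b).length = b.length := mark_len _ _
    simp only [List.foldl_cons]
    rw [ih _ (fun q hq => hP q (List.mem_cons_of_mem _ hq)) (by rw [hlen]; exact hil),
      mark_get _ _ _ _ hmr hi0 hil]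
    by_cases h1 : ∃ q ∈ rest, i ∈ PySem.List.pyRange q phi q
    · rw [if_pos h1, if_pos ⟨h1.choose, List.mem_cons_of_mem _ h1.choose_spec.1, h1.choose_spec.2⟩]
    · rw [if_neg h1]
      by_cases h2 : i ∈ PySem.List.pyRange p phi p
      · rw [if_pos h2, if_pos ⟨p, List.mem_cons_self, h2⟩]
      · rw [if_neg h2, if_neg ?_]
        rintro ⟨q, hq, hqr⟩
        rcases List.mem_cons.mp hq with rfl | hq'
        · exact h2 hqr
        · exact h1 ⟨q, hq', hqr⟩

theorem scan_eq (mf pf : PySem.Set Int) (blocked : List Bool) (l : List Int)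
    (h : ∀ i ∈ l,
      (PySem.Set.inter (PySem.Set.ofList (factors_of i)) mf = []
          ∧ PySem.Set.inter (PySem.Set.ofList (factors_of i)) pf = [])
        ↔ PySem.List.pyGetD blocked i true = false) :
    pvKeyLoop mf pf l = pvScan blocked l := by
  induction l with
  | nil => rfl
  | cons i rest ih =>
    have hi := h i List.mem_cons_self
    simp only [pvKeyLoop, pvScan]
    by_cases hc : PySem.Set.inter (PySem.Set.ofList (factors_of i)) mf = []
        ∧ PySem.Set.inter (PySem.Set.ofList (factors_of i)) pf = []
    · rw [if_pos hc, if_pos (hi.mp hc)]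
    · rw [if_neg hc, if_neg (fun hb => hc (hi.mpr hb)),
        ih (fun j hj => h j (List.mem_cons_of_mem _ hj))]

-- ===== VERDICT (by name: the statement is the Claim_ definition above) =====
theorem encryption_key_spec : Claim_equal_encryption_key := by
  intro pp phi _
  unfold Spec_encryption_key encryption_key encryption_key_alt
  by_cases hphi : phi ≤ 2
  · rw [if_pos hphi, PySem.List.pyRange_one_eq_nil (by omega)]
    rfl
  · rw [if_neg hphi]
    apply scan_eq
    intro i hi
    rw [PySem.List.mem_pyRange_one] at hi
    have hP : ∀ p ∈ pvPrimeFactors pp ++ pvPrimeFactors phi, 2 ≤ p := by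
      intro p hp
      rcases List.mem_append.mp hp with h | h <;>
        exact ((pvPrimeFactors_mem _ p).mp h).1.1
    have hlen : ((List.replicate phi.toNat false).length : Int) = phi := by
      simp; omega
    rw [sieve_get _ phi _ i true hP (by omega) (by rw [hlen]; omega),
      inter_factors_empty_iff i pp hi.1, inter_factors_empty_iff i phi hi.1]
    have hrep : PySem.List.pyGetD (List.replicate phi.toNat false) i true = false := by
      rw [PySem.List.pyGetD_eq_getElem _ _ (by omega) (by rw [hlen]; omega)]
      simp
    rw [hrep]
    by_cases hex : ∃ p ∈ pvPrimeFactors pp ++ pvPrimeFactors phi,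
        i ∈ PySem.List.pyRange p phi p
    · rw [if_pos hex]
      obtain ⟨p, hpP, hpr⟩ := hex
      have hp2 : 2 ≤ p := hP p hpP
      have hpi : p ∣ i := by
        obtain ⟨_, _, hd⟩ := (PySem.List.mem_pyRange_iff_of_pos (by omega) i).mp hpr
        simpa using dvd_add hd (dvd_refl p)
      refine iff_of_false ?_ (by simp)
      rcases List.mem_append.mp hpP with hmem | hmem
      · obtain ⟨hpr', hpn, hn2⟩ := (pvPrimeFactors_mem pp p).mp hmem
        rintro ⟨h1, _⟩
        exact h1 ⟨p, hpr', hpi, hpn, hn2⟩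
      · obtain ⟨hpr', hpn, hn2⟩ := (pvPrimeFactors_mem phi p).mp hmem
        rintro ⟨_, h2⟩
        exact h2 ⟨p, hpr', hpi, hpn, hn2⟩
    · rw [if_neg hex]
      refine iff_of_true ⟨?_, ?_⟩ rfl
      · rintro ⟨p, hpr', hpi, hpn, hn2⟩
        refine hex ⟨p, List.mem_append.mpr (Or.inl ((pvPrimeFactors_mem pp p).mpr
          ⟨hpr', hpn, hn2⟩)), ?_⟩
        exact (PySem.List.mem_pyRange_iff_of_pos (by have := hpr'.1; omega) i).mpr
          ⟨Int.le_of_dvd (by omega) hpi, hi.2, dvd_sub hpi (dvd_refl p)⟩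
      · rintro ⟨p, hpr', hpi, hpn, hn2⟩
        refine hex ⟨p, List.mem_append.mpr (Or.inr ((pvPrimeFactors_mem phi p).mpr
          ⟨hpr', hpn, hn2⟩)), ?_⟩
        exact (PySem.List.mem_pyRange_iff_of_pos (by have := hpr'.1; omega) i).mpr
          ⟨Int.le_of_dvd (by omega) hpi, hi.2, dvd_sub hpi (dvd_refl p)⟩
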